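-- pv_equiv track=rewrite | github.com/nijigenerate/nicxlive | doc/_update_compat_unity_backend.py | coarsen_non_core
-- ===== SOURCE A (Python) =====
-- from typing import Dict, List, Tuple, Optional
--
-- CORE_METHODS = {
--     "beginscene", "endscene", "postprocessscene", "presentscenetobackbuffer", "rebindactivetargets",
--     "drawpartpacket", "executemaskpacket", "setupshaderstage", "renderstage",
--     "beginmask", "applymask", "beginmaskcontent", "endmask",
--     "begindynamiccomposite", "enddynamiccomposite",
--     "applyblendmode", "setlegacyblendmode", "setadvancedblendequation",
--     "blendmodebarrier", "issueblendbarrier", "applyblendingcapabilities",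
-- }
--
-- def coarsen_non_core(name: str, flow: List[str]) -> List[str]:
--     if not flow:
--         return flow
--     if name.lower() in CORE_METHODS:
--         return flow
--     head = flow[0]
--     kept = [head]
--     if "." in head:
--         prefix = head.split(".", 1)[0] + "."
--         for t in flow[1:]:
--             if t.startswith(prefix) or t in {"backend.current", "backend.require", "backend.ensure", "backend.try", "render.exec", "device.init"}:
--                 if kept[-1] != t:
--                     kept.append(t)
--     return kept
-- ===== SOURCE B (Python) =====
-- from itertools import dropwhile
-- from typing import List
--
-- CORE_METHODS = {
--     "beginscene", "endscene", "postprocessscene", "presentscenetobackbuffer", "rebindactivetargets",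
--     "drawpartpacket", "executemaskpacket", "setupshaderstage", "renderstage",
--     "beginmask", "applymask", "beginmaskcontent", "endmask",
--     "begindynamiccomposite", "enddynamiccomposite",
--     "applyblendmode", "setlegacyblendmode", "setadvancedblendequation",
--     "blendmodebarrier", "issueblendbarrier", "applyblendingcapabilities",
-- }
--
-- ALLOWED = {"backend.current", "backend.require", "backend.ensure", "backend.try", "render.exec", "device.init"}
--
-- def coarsen_non_core(name: str, flow: List[str]) -> List[str]:
--     if not flow:
--         return flow
--     if name.lower() in CORE_METHODS:
--         return flow
--     head = flow[0]
--     if "." not in head: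
--         return [head]
--     prefix = head.split(".", 1)[0] + "."
--
--     def keep(t: str) -> bool:
--         return t.startswith(prefix) or t in ALLOWED
--
--     def go(last: str, ts: List[str]) -> List[str]:
--         # skip the whole run of tokens that are filtered out or repeat the last kept one
--         ts = list(dropwhile(lambda t: not keep(t) or t == last, ts))
--         if not ts:
--             return []
--         return [ts[0]] + go(ts[0], ts[1:])
--
--     return [head] + go(head, flow[1:])
-- ===== Notes on version B (the rewrite author's own statement) =====
-- stated objective: alternative
-- what changed: Replaces A's fold that conditionally appends each token after comparing it with kept[-1] by a recursive run-skipper: each step uses itertools.dropwhile to discard the whole run of rejected/repeated tokens, emits the next surviving token, and recurses with it as the new anchor.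
import Mathlib
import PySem

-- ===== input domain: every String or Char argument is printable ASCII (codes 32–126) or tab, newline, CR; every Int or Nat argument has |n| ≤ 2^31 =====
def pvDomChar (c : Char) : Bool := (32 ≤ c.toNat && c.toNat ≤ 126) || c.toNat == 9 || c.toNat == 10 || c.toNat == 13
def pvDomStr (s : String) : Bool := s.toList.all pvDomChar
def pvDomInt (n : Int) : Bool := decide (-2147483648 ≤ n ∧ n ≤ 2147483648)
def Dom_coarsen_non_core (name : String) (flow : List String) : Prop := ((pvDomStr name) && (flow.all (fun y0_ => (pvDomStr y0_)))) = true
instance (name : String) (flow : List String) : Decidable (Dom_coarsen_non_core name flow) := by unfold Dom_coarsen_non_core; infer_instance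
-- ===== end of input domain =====

-- B replaces A's fold (conditional append after comparing with kept[-1]) by a recursive
-- run-skipper: dropWhile discards each run of rejected/repeated tokens, then recurse.

-- ===== PORT A =====
def pvCORE : List String := ["beginscene", "endscene", "postprocessscene", "presentscenetobackbuffer", "rebindactivetargets",
  "drawpartpacket", "executemaskpacket", "setupshaderstage", "renderstage",
  "beginmask", "applymask", "beginmaskcontent", "endmask",
  "begindynamiccomposite", "enddynamiccomposite",
  "applyblendmode", "setlegacyblendmode", "setadvancedblendequation",
  "blendmodebarrier", "issueblendbarrier", "applyblendingcapabilities"]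

def pvALLOWED : List String := ["backend.current", "backend.require", "backend.ensure", "backend.try", "render.exec", "device.init"]

-- the filter condition 't.startswith(prefix) or t in {...}', identical in both Pythons
def pvKeep (pre t : String) : Bool := PySem.Str.startswith t pre || pvALLOWED.contains t

-- prefix = head.split(".", 1)[0] + "." , identical expression in both Pythons
def pvPrefix (head : String) : String := ((PySem.Str.splitMax? head "." 1).getD []).headD "" ++ "."

def coarsen_non_core (name : String) (flow : List String) : List String :=
  match flow with
  | [] => flow
  | head :: rest =>
    if pvCORE.contains (PySem.Str.lower name) then flow
    else
      let kept := [head]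
      if PySem.Str.isIn "." head then
        let pre := pvPrefix head
        rest.foldl (fun kept t =>
          if pvKeep pre t then
            if PySem.List.pyGet? kept (-1) ≠ some t then kept ++ [t] else kept
          else kept) kept
      else kept

-- ===== PORT B =====
-- the recursive run-skipper 'go' of Source B: dropwhile, then emit the survivor and recurse
def pvGo (pre last : String) (ts : List String) : List String :=
  match h : ts.dropWhile (fun t => !(pvKeep pre t) || t == last) with
  | [] => []
  | t :: rest =>
    have hlt : rest.length < ts.length := by
      have h1 : (ts.dropWhile (fun t => !(pvKeep pre t) || t == last)).length ≤ ts.length :=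
        List.length_dropWhile_le _ _
      rw [h] at h1; simp at h1; omega
    [t] ++ pvGo pre t rest
termination_by ts.length

def coarsen_non_core_alt (name : String) (flow : List String) : List String :=
  match flow with
  | [] => flow
  | head :: rest =>
    if pvCORE.contains (PySem.Str.lower name) then flow
    else if !(PySem.Str.isIn "." head) then [head]
    else
      let pre := pvPrefix head
      [head] ++ pvGo pre head rest

-- ===== PRECONDITION & SPEC =====
def Spec_coarsen_non_core (name : String) (flow : List String) (out : List String) : Prop := out = coarsen_non_core_alt name flow
instance (name : String) (flow : List String) (out : List String) : Decidable (Spec_coarsen_non_core name flow out) := by unfold Spec_coarsen_non_core; infer_instance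

-- ===== CLAIM (what is proved, stated in full; the proofs are below) =====
def Claim_equal_coarsen_non_core : Prop := ∀ (name : String) (flow : List String), Dom_coarsen_non_core name flow → Spec_coarsen_non_core name flow (coarsen_non_core name flow)

-- ===== LEMMAS AND PROOFS =====

-- structural reformulation of the run-skipper, used only by the proofs
def pvGoS (pre last : String) : List String → List String
  | [] => []
  | t :: ts => if !(pvKeep pre t) || t == last then pvGoS pre last ts else t :: pvGoS pre t ts

lemma pvGoS_dropWhile (pre last : String) (ts : List String) :
    pvGoS pre last ts =
      match ts.dropWhile (fun t => !(pvKeep pre t) || t == last) with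
      | [] => []
      | t :: rest => t :: pvGoS pre t rest := by
  induction ts generalizing last with
  | nil => rfl
  | cons t ts ih =>
    by_cases hc : (!(pvKeep pre t) || t == last) = true
    · simp only [List.dropWhile_cons, if_pos hc, pvGoS]
      exact ih last
    · simp only [List.dropWhile_cons, if_neg hc, pvGoS]

lemma pvGo_eq_S (pre last : String) (ts : List String) : pvGo pre last ts = pvGoS pre last ts := by
  rw [pvGo, pvGoS_dropWhile]
  split
  · next heq => rw [heq]
  · next t rest heq =>
    have hlt : rest.length < ts.length := by
      have h1 := List.length_dropWhile_le (fun t => !(pvKeep pre t) || t == last) ts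
      rw [heq] at h1; simp at h1; omega
    conv_rhs => rw [heq]
    show [t] ++ pvGo pre t rest = t :: pvGoS pre t rest
    rw [pvGo_eq_S pre t rest]; rfl
termination_by ts.length

-- A's fused loop, started on acc ++ [a], equals acc followed by a and the run-skipper's output
lemma loop_eq_go (pre : String) :
    ∀ (ts acc : List String) (a : String),
      ts.foldl (fun kept t =>
          if pvKeep pre t then
            if PySem.List.pyGet? kept (-1) ≠ some t then kept ++ [t] else kept
          else kept) (acc ++ [a])
        = acc ++ a :: pvGoS pre a ts := by
  intro ts
  induction ts with
  | nil => intro acc a; simp [pvGoS]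
  | cons t ts ih =>
    intro acc a
    simp only [List.foldl_cons, pvGoS]
    by_cases hp : pvKeep pre t = true
    · rw [if_pos hp, PySem.List.pyGet?_neg_one_append_singleton]
      by_cases hat : a = t
      · rw [if_neg (by simp [hat]), if_pos (by simp [hat])]
        exact ih acc a
      · rw [if_pos (by simp [hat]), if_neg (by simp [hp, Ne.symm hat])]
        rw [ih (acc ++ [a]) t]; simp
    · rw [if_neg hp, if_pos (by simp [hp])]
      exact ih acc a
-- ===== VERDICT (by name: the statement is the Claim_ definition above) =====
theorem coarsen_non_core_spec : Claim_equal_coarsen_non_core := by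
  intro name flow _
  unfold Spec_coarsen_non_core
  cases flow with
  | nil => rfl
  | cons head rest =>
    simp only [coarsen_non_core, coarsen_non_core_alt]
    by_cases hc : pvCORE.contains (PySem.Str.lower name) = true
    · rw [if_pos hc, if_pos hc]
    · rw [if_neg hc, if_neg hc]
      by_cases hd : PySem.Str.isIn "." head = true
      · rw [if_pos hd, if_neg (by rw [hd]; simp)]
        rw [pvGo_eq_S]
        exact loop_eq_go (pvPrefix head) rest [] head
      · rw [if_neg hd, if_pos (by revert hd; cases PySem.Str.isIn "." head <;> simp)]
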